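-- pv_equiv track=rewrite | github.com/TheTeaRex/adventofcode | day_06_tuning_trouble/code.py | better_solution
-- ===== SOURCE A (Python) =====
-- def better_solution(text, unique):
--     buffer = set()
--     i = j = 0
--     while j < len(text):
--         if text[j] not in buffer:
--             buffer.add(text[j])
--         else:
--             while i < j:
--                 if text[i] == text[j]:
--                     i += 1
--                     break
--                 buffer.remove(text[i])
--                 i += 1
--         j += 1
--         if len(buffer) == unique:
--             return j
--     return None
-- ===== SOURCE B (Python) =====
-- def better_solution(text, unique):
--     if unique < 1:
--         return None
--     for i in range(unique, len(text) + 1):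
--         if len(set(text[i - unique:i])) == unique:
--             return i
--     return None
-- ===== Notes on version B (the rewrite author's own statement) =====
-- stated objective: simpler
-- what changed: A's single maintained sliding window (incrementally updated set plus two pointers) is replaced by a fixed-width brute-force scan that builds a fresh set for each window text[i-unique:i] and returns the first index whose window is all-distinct; for unique < 1 no window qualifies, so B returns None there like A.
import Mathlib
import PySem

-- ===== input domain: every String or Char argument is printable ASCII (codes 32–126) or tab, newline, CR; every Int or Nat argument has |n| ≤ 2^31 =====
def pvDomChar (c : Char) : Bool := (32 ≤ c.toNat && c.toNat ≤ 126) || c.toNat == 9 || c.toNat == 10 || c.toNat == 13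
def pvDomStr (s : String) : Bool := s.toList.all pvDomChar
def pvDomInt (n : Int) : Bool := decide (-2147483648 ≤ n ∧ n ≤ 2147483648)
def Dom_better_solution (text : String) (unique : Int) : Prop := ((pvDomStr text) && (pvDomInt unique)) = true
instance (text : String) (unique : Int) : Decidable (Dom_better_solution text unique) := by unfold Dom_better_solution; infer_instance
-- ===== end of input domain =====

-- B re-implements A's maintained sliding window as a fixed-width brute-force scan (fresh set per window); equivalence of the two is proved below.

-- ===== PORT A =====
-- inner `while i < j:` loop of A: advance i (removing chars from the buffer) until just past the duplicate of text[j]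
def pvCatchUp (cs : List Char) (j : Nat) (buffer : PySem.Set Char) (i : Nat) : PySem.Set Char × Nat :=
  if h : i < j then
    if cs.getD i ' ' == cs.getD j ' ' then (buffer, i + 1)
    -- Python's buffer.remove(text[i]): text[i] is always in the buffer here (window invariant), so discard is exact
    else pvCatchUp cs j (PySem.Set.discard buffer (cs.getD i ' ')) (i + 1)
  else (buffer, i)
termination_by j - i
decreasing_by omega

-- body of A's outer loop before `j += 1`: the (buffer, i) state after processing text[j]
def pvStep (cs : List Char) (buffer : PySem.Set Char) (i j : Nat) : PySem.Set Char × Nat :=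
  if PySem.Set.contains buffer (cs.getD j ' ') = false then (PySem.Set.add buffer (cs.getD j ' '), i)
  else pvCatchUp cs j buffer i

-- outer `while j < len(text):` loop of A
def pvScan (cs : List Char) (unique : Int) (buffer : PySem.Set Char) (i j : Nat) : Option Int :=
  if h : j < cs.length then
    let st := pvStep cs buffer i j
    if PySem.Set.len st.1 = unique then some ((j : Int) + 1)
    else pvScan cs unique st.1 st.2 (j + 1)
  else none
termination_by cs.length - j
decreasing_by omega

def better_solution (text : String) (unique : Int) : Option Int :=
  pvScan text.toList unique PySem.Set.empty 0 0

-- ===== PORT B =====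
-- `for i in range(unique, len(text)+1):` with the fresh-set window test, as recursion on i
def pvBrute (cs : List Char) (unique : Int) (i : Nat) : Option Int :=
  if h : i ≤ cs.length then
    if PySem.Set.len (PySem.Set.ofList (PySem.List.slice cs (some ((i : Int) - unique)) (some (i : Int)))) = unique
    then some (i : Int)
    else pvBrute cs unique (i + 1)
  else none
termination_by cs.length + 1 - i
decreasing_by omega

def better_solution_alt (text : String) (unique : Int) : Option Int :=
  if unique < 1 then none
  else pvBrute text.toList unique unique.toNat

-- ===== PRECONDITION & SPEC =====
def Spec_better_solution (text : String) (unique : Int) (out : Option Int) : Prop := out = better_solution_alt text unique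
instance (text : String) (unique : Int) (out : Option Int) : Decidable (Spec_better_solution text unique out) := by unfold Spec_better_solution; infer_instance

-- ===== CLAIM (what is proved, stated in full; the proofs are below) =====
def Claim_equal_better_solution : Prop := ∀ (text : String) (unique : Int), Dom_better_solution text unique → Spec_better_solution text unique (better_solution text unique)

-- ===== LEMMAS AND PROOFS =====

def pvWin (cs : List Char) (i j : Nat) : List Char := (cs.drop i).take (j - i)

lemma pvWin_succ_right (cs : List Char) (i j : Nat) (hij : i ≤ j) (hj : j < cs.length) :
    pvWin cs i (j + 1) = pvWin cs i j ++ [cs.getD j ' '] := by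
  unfold pvWin
  have h1 : j + 1 - i = (j - i) + 1 := by omega
  rw [h1, List.take_add_one, List.getElem?_drop]
  have h2 : i + (j - i) = j := by omega
  rw [h2]
  simp [List.getD, List.getElem?_eq_getElem hj]

lemma pvWin_cons (cs : List Char) (i j : Nat) (hij : i < j) (hj : j ≤ cs.length) :
    pvWin cs i j = cs.getD i ' ' :: pvWin cs (i + 1) j := by
  unfold pvWin
  have hi : i < cs.length := by omega
  rw [List.drop_eq_getElem_cons hi]
  have h1 : j - i = (j - (i+1)) + 1 := by omega
  rw [h1, List.take_succ_cons]
  simp [List.getD, List.getElem?_eq_getElem hi]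

lemma pvWin_nil (cs : List Char) (i j : Nat) (h : j ≤ i) : pvWin cs i j = [] := by
  simp [pvWin]; omega

lemma pvWin_not_nodup_mono (cs : List Char) (k j : Nat) (hj : j < cs.length)
    (h : ¬ (pvWin cs k j).Nodup) : ¬ (pvWin cs k (j + 1)).Nodup := by
  by_cases hk : k < j
  · rw [pvWin_succ_right cs k j (by omega) hj]
    intro hnd
    exact h (hnd.sublist (List.sublist_append_left _ _))
  · exact absurd (by rw [pvWin_nil cs k j (by omega)]; exact List.nodup_nil) h

lemma pvOfList_sublist {α : Type} [BEq α] [LawfulBEq α] (xs : List α) :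
    (PySem.Set.ofList xs).Sublist xs := by
  induction xs with
  | nil => simp [PySem.Set.ofList]
  | cons x xs ih =>
      rw [PySem.Set.ofList_cons]
      have h1 : (PySem.Set.discard (PySem.Set.ofList xs) x).Sublist (PySem.Set.ofList xs) := by
        unfold PySem.Set.discard; exact List.filter_sublist
      exact List.Sublist.cons₂ x (h1.trans ih)

lemma pvLen_ofList_eq_iff {α : Type} [BEq α] [LawfulBEq α] (xs : List α) :
    (PySem.Set.ofList xs).length = xs.length ↔ xs.Nodup := by
  constructor
  · intro h
    have := (pvOfList_sublist xs).eq_of_length h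
    rw [← this]
    exact PySem.Set.nodup_ofList xs
  · intro h
    rw [PySem.Set.ofList_eq_self_of_nodup xs h]

lemma pvWin_length (cs : List Char) (i j : Nat) (hj : j ≤ cs.length) :
    (pvWin cs i j).length = j - i := by
  simp [pvWin]; omega

lemma pvBrute_test (cs : List Char) (u : Int) (b : Nat) (hu : 1 ≤ u)
    (hub : u.toNat ≤ b) (hb : b ≤ cs.length) :
    (PySem.Set.len (PySem.Set.ofList (PySem.List.slice cs (some ((b : Int) - u)) (some (b : Int)))) = u)
      ↔ (pvWin cs (b - u.toNat) b).Nodup := by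
  have h1 : (b : Int) - u = ((b - u.toNat : Nat) : Int) := by omega
  rw [h1, PySem.List.slice_natCast]
  have h2 : List.take (b - (b - u.toNat)) (List.drop (b - u.toNat) cs) = pvWin cs (b - u.toNat) b := rfl
  rw [h2]
  have hw : (pvWin cs (b - u.toNat) b).length = u.toNat := by
    rw [pvWin_length cs _ b hb]; omega
  unfold PySem.Set.len
  constructor
  · intro h
    rw [← pvLen_ofList_eq_iff, hw]
    omega
  · intro h
    rw [pvLen_ofList_eq_iff _ |>.mpr h, hw]
    omega
-- ===== PORT A =====
-- inner `while i < j:` loop of A: advance i (removing chars from the buffer) until just past the duplicate of text[j]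

def pvInv (cs : List Char) (i j : Nat) (buffer : PySem.Set Char) : Prop :=
  i ≤ j ∧ j ≤ cs.length ∧ buffer.Nodup ∧
  (∀ x, x ∈ buffer ↔ x ∈ pvWin cs i j) ∧ (pvWin cs i j).Nodup ∧
  (∀ k, k < i → ¬ (pvWin cs k j).Nodup)

lemma pvCatchUp_spec (cs : List Char) (j : Nat) (hj : j < cs.length) :
    ∀ (m i : Nat) (buffer : PySem.Set Char), j - i ≤ m → i ≤ j → buffer.Nodup →
    (∀ x, x ∈ buffer ↔ x ∈ pvWin cs i j) → (pvWin cs i j).Nodup →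
    cs.getD j ' ' ∈ pvWin cs i j →
    i < (pvCatchUp cs j buffer i).2 ∧ (pvCatchUp cs j buffer i).2 ≤ j ∧
    (pvCatchUp cs j buffer i).1.Nodup ∧
    (∀ x, x ∈ (pvCatchUp cs j buffer i).1 ↔ x ∈ pvWin cs (pvCatchUp cs j buffer i).2 (j + 1)) ∧
    (pvWin cs (pvCatchUp cs j buffer i).2 (j + 1)).Nodup ∧
    (∀ k, i ≤ k → k < (pvCatchUp cs j buffer i).2 → ¬ (pvWin cs k (j + 1)).Nodup) := by
  intro m
  induction m with
  | zero =>
      intro i buffer hm hij hnb hmemb hnd hmem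
      exfalso
      have hij' : i < j := by
        by_contra hc
        rw [pvWin_nil cs i j (by omega)] at hmem
        simp at hmem
      omega
  | succ m ih =>
      intro i buffer hm hij hnb hmemb hnd hmem
      have hij' : i < j := by
        by_contra hc
        rw [pvWin_nil cs i j (by omega)] at hmem
        simp at hmem
      have hcons := pvWin_cons cs i j hij' (by omega)
      rw [pvCatchUp, dif_pos hij']
      by_cases hc : cs.getD i ' ' = cs.getD j ' '
      · -- text[i] == text[j]: stop, i ← i+1
        rw [if_pos (by simpa using hc)]
        have hsucc : pvWin cs (i+1) (j+1) = pvWin cs (i+1) j ++ [cs.getD j ' '] :=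
          pvWin_succ_right cs (i+1) j hij' hj
        have htail : (pvWin cs (i+1) j).Nodup ∧ cs.getD i ' ' ∉ pvWin cs (i+1) j := by
          rw [hcons] at hnd
          exact ⟨(List.nodup_cons.mp hnd).2, (List.nodup_cons.mp hnd).1⟩
        refine ⟨by omega, by omega, hnb, ?_, ?_, ?_⟩
        · intro x
          rw [hmemb x, hcons, hsucc, hc]
          simp [List.mem_cons, List.mem_append, or_comm]
        · rw [hsucc, ← List.concat_eq_append]
          exact List.Nodup.concat (fun hmem' => htail.2 (hc ▸ hmem')) htail.1
        · intro k hk1 hk2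
          have hk : k = i := by omega
          subst hk
          rw [pvWin_cons cs k (j+1) (by omega) (by omega)]
          intro hnd'
          have : cs.getD k ' ' ∈ pvWin cs (k+1) (j+1) := by
            rw [hsucc, hc]
            exact List.mem_append_right _ (List.mem_singleton_self _)
          exact (List.nodup_cons.mp hnd').1 this
      · -- text[i] != text[j]: remove text[i], continue
        rw [if_neg (by simpa using hc)]
        have hnd1 : (pvWin cs (i+1) j).Nodup ∧ cs.getD i ' ' ∉ pvWin cs (i+1) j := by
          rw [hcons] at hnd
          exact ⟨(List.nodup_cons.mp hnd).2, (List.nodup_cons.mp hnd).1⟩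
        have hmem1 : cs.getD j ' ' ∈ pvWin cs (i+1) j := by
          rw [hcons] at hmem
          rcases List.mem_cons.mp hmem with h | h
          · exact absurd h.symm hc
          · exact h
        have hij1 : i + 1 ≤ j := by
          by_contra hcon
          rw [pvWin_nil cs (i+1) j (by omega)] at hmem1
          simp at hmem1
        have hmemb1 : ∀ x, x ∈ PySem.Set.discard buffer (cs.getD i ' ') ↔ x ∈ pvWin cs (i+1) j := by
          intro x
          rw [PySem.Set.mem_discard, hmemb x, hcons]
          constructor
          · rintro ⟨h1, h2⟩
            rcases List.mem_cons.mp h1 with h | h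
            · exact absurd h h2
            · exact h
          · intro h
            exact ⟨List.mem_cons_of_mem _ h, fun he => hnd1.2 (he ▸ h)⟩
        have := ih (i+1) (PySem.Set.discard buffer (cs.getD i ' ')) (by omega) hij1
          (PySem.Set.nodup_discard buffer (cs.getD i ' ') hnb) hmemb1 hnd1.1 hmem1
        obtain ⟨h1, h2, h3, h4, h5, h6⟩ := this
        refine ⟨by omega, h2, h3, h4, h5, ?_⟩
        intro k hk1 hk2
        by_cases hki : i + 1 ≤ k
        · exact h6 k hki hk2
        · have hk : k = i := by omega
          subst hk
          rw [pvWin_cons cs k (j+1) (by omega) (by omega)]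
          intro hnd'
          exact h6 (k+1) le_rfl h1 (List.nodup_cons.mp hnd').2

lemma pvStep_spec (cs : List Char) (i j : Nat) (buffer : PySem.Set Char)
    (hinv : pvInv cs i j buffer) (hj : j < cs.length) :
    i ≤ (pvStep cs buffer i j).2 ∧ (pvStep cs buffer i j).2 ≤ j ∧
    pvInv cs (pvStep cs buffer i j).2 (j + 1) (pvStep cs buffer i j).1 := by
  obtain ⟨hij, hjn, hnb, hmemb, hnd, hmin⟩ := hinv
  unfold pvStep
  by_cases hcon : PySem.Set.contains buffer (cs.getD j ' ') = false
  · rw [if_pos hcon]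
    have hnm : cs.getD j ' ' ∉ buffer := by
      intro h
      have h2 : PySem.Set.contains buffer (cs.getD j ' ') = true :=
        (PySem.Set.contains_iff _ _).mpr h
      rw [hcon] at h2
      exact Bool.false_ne_true h2
    have hnw : cs.getD j ' ' ∉ pvWin cs i j := fun h => hnm ((hmemb _).mpr h)
    rw [PySem.Set.add_of_not_mem hnm]
    have hsucc := pvWin_succ_right cs i j hij hj
    refine ⟨le_rfl, hij, by omega, by omega, ?_, ?_, ?_, ?_⟩
    · rw [← List.concat_eq_append]
      exact List.Nodup.concat hnm hnb
    · intro x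
      rw [hsucc]
      rw [List.mem_append, List.mem_append, hmemb x]
    · rw [hsucc, ← List.concat_eq_append]
      exact List.Nodup.concat hnw hnd
    · intro k hk
      exact pvWin_not_nodup_mono cs k j hj (hmin k hk)
  · rw [if_neg hcon]
    have hmemB : cs.getD j ' ' ∈ buffer := by
      rw [← PySem.Set.contains_iff]
      revert hcon
      cases PySem.Set.contains buffer (cs.getD j ' ') <;> simp
    have hmemw := (hmemb _).mp hmemB
    obtain ⟨h1, h2, h3, h4, h5, h6⟩ :=
      pvCatchUp_spec cs j hj (j - i) i buffer le_rfl hij hnb hmemb hnd hmemw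
    refine ⟨by omega, h2, by omega, by omega, h3, h4, h5, ?_⟩
    intro k hk
    by_cases hki : k < i
    · exact pvWin_not_nodup_mono cs k j hj (hmin k hki)
    · exact h6 k (by omega) hk

lemma pvBrute_none (cs : List Char) (u : Int) (b : Nat) (h : cs.length < b) :
    pvBrute cs u b = none := by
  rw [pvBrute]
  simp [Nat.not_le.mpr h]

lemma pvBufLen (cs : List Char) (i j : Nat) (buffer : PySem.Set Char)
    (hinv : pvInv cs i j buffer) : buffer.length = j - i := by
  obtain ⟨hij, hjn, hnb, hmemb, hnd, -⟩ := hinv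
  have hperm : buffer.Perm (pvWin cs i j) :=
    (List.perm_ext_iff_of_nodup hnb hnd).mpr hmemb
  rw [hperm.length_eq, pvWin_length cs i j hjn]

lemma pvScan_none (cs : List Char) (u : Int) (hu : u < 1) :
    ∀ (m j i : Nat) (buffer : PySem.Set Char), cs.length - j ≤ m →
    pvInv cs i j buffer → pvScan cs u buffer i j = none := by
  intro m
  induction m with
  | zero =>
      intro j i buffer hm hinv
      rw [pvScan, dif_neg (by omega)]
  | succ m ih =>
      intro j i buffer hm hinv
      by_cases hj : j < cs.length
      · rw [pvScan, dif_pos hj]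
        obtain ⟨hle, hsj, hinv'⟩ := pvStep_spec cs i j buffer hinv hj
        have hlen := pvBufLen cs _ (j+1) _ hinv'
        have hne : ¬ PySem.Set.len (pvStep cs buffer i j).1 = u := by
          unfold PySem.Set.len
          omega
        simp only [if_neg hne]
        exact ih (j+1) _ _ (by omega) hinv'
      · rw [pvScan, dif_neg hj]

lemma pvScan_eq_pvBrute (cs : List Char) (u : Int) (hu : 1 ≤ u) :
    ∀ (m j i : Nat) (buffer : PySem.Set Char), cs.length - j ≤ m →
    pvInv cs i j buffer → j - i < u.toNat →
    pvScan cs u buffer i j = pvBrute cs u (max u.toNat (j + 1)) := by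
  intro m
  induction m with
  | zero =>
      intro j i buffer hm hinv hb
      have hjn : j = cs.length := by
        obtain ⟨-, h, -⟩ := hinv
        omega
      rw [pvScan, dif_neg (by omega), pvBrute_none cs u _ (by omega)]
  | succ m ih =>
      intro j i buffer hm hinv hb
      by_cases hj : j < cs.length
      · rw [pvScan, dif_pos hj]
        obtain ⟨hle, hsj, hinv'⟩ := pvStep_spec cs i j buffer hinv hj
        have hlen := pvBufLen cs _ (j+1) _ hinv'
        by_cases hhit : PySem.Set.len (pvStep cs buffer i j).1 = u
        · simp only [if_pos hhit]
          unfold PySem.Set.len at hhit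
          have hun : j + 1 - (pvStep cs buffer i j).2 = u.toNat := by omega
          have hmax : max u.toNat (j + 1) = j + 1 := by omega
          rw [hmax, pvBrute, dif_pos (by omega)]
          have htest := pvBrute_test cs u (j+1) hu (by omega) (by omega)
          have hi2 : j + 1 - u.toNat = (pvStep cs buffer i j).2 := by omega
          rw [if_pos (htest.mpr (by rw [hi2]; exact hinv'.2.2.2.2.1))]
          exact congrArg some (by push_cast; ring)
        · simp only [if_neg hhit]
          have hne' : j + 1 - (pvStep cs buffer i j).2 ≠ u.toNat := by
            intro h
            apply hhit
            unfold PySem.Set.len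
            omega
          have hbound : (j + 1) - (pvStep cs buffer i j).2 < u.toNat := by omega
          rw [ih (j+1) _ _ (by omega) hinv' hbound]
          by_cases hcase : u.toNat ≤ j + 1
          · have hm1 : max u.toNat (j + 1) = j + 1 := by omega
            have hm2 : max u.toNat (j + 2) = j + 2 := by omega
            have htest := pvBrute_test cs u (j+1) hu (by omega) (by omega)
            have hfail : ¬ (PySem.Set.len (PySem.Set.ofList (PySem.List.slice cs
                (some (((j+1 : Nat) : Int) - u)) (some ((j+1 : Nat) : Int)))) = u) := by
              intro hyes
              have hnd := htest.mp hyes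
              exact hinv'.2.2.2.2.2 (j + 1 - u.toNat) (by omega) hnd
            have hstep : pvBrute cs u (j + 1) = pvBrute cs u (j + 2) := by
              rw [pvBrute, dif_pos (by omega), if_neg hfail]
            rw [hm1, hm2, hstep]
          · have hm1 : max u.toNat (j + 1) = u.toNat := by omega
            have hm2 : max u.toNat (j + 2) = u.toNat := by omega
            rw [hm1, hm2]
      · have hjn : j = cs.length := by
          obtain ⟨-, h, -⟩ := hinv
          omega
        rw [pvScan, dif_neg hj, pvBrute_none cs u _ (by omega)]

lemma pvInv_init (cs : List Char) : pvInv cs 0 0 PySem.Set.empty := by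
  refine ⟨le_refl 0, Nat.zero_le _, List.nodup_nil, ?_, ?_, ?_⟩ <;>
    simp [pvWin, PySem.Set.empty]

-- ===== VERDICT (by name: the statement is the Claim_ definition above) =====
theorem better_solution_spec : Claim_equal_better_solution := by
  intro text unique _
  unfold Spec_better_solution better_solution better_solution_alt
  by_cases hu : unique < 1
  · simp only [if_pos hu]
    exact pvScan_none text.toList unique hu text.toList.length 0 0 PySem.Set.empty (by omega) (pvInv_init _)
  · simp only [if_neg hu]
    have hu' : 1 ≤ unique := by omega
    have h := pvScan_eq_pvBrute text.toList unique hu' text.toList.length 0 0 PySem.Set.empty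
      (by omega) (pvInv_init _) (by omega)
    rw [h]
    congr 1
    omega
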